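-- pv_equiv track=rewrite | github.com/0xGeorgii/LeetcodeSolutions | Weekly Contest/Weekly Contest 309/Number of Ways to Reach a Position After Exactly k Steps/number-of-ways-to-reach-a-position-after-exactly-k-steps.py | numberOfWays
-- ===== SOURCE A (Python) =====
-- class Node:
--     def __init__(self, val=0, left=None, right=None):
--          self.val = val
--          self.left = left
--          self.right = right
--
-- def numberOfWays(startPos: int, endPos: int, k: int) -> int:
--
--     root = Node(val = startPos)
--
--     level = [ root ]
--
--     for i in range(k):
--         level_tmp = []
--         for j in range(len(level)):
--             n = level.pop()
--             n.left = Node(val = n.val + 1)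
--             n.right = Node(val = n.val - 1)
--             level_tmp.append(n.left)
--             level_tmp.append(n.right)
--         level = level_tmp
--
--     res = 0
--     for i in range(len(level)):
--         n = level.pop()
--         if n.val == endPos:
--             res += 1
--
--     return res
-- ===== SOURCE B (Python) =====
-- def numberOfWays(startPos: int, endPos: int, k: int) -> int:
--     # Each sequence of k unit steps ending at endPos has exactly m = (d + k) / 2
--     # "+1" steps, where d = endPos - startPos; the answer is C(k, m).
--     d = endPos - startPos
--     if (d + k) % 2 != 0 or abs(d) > k:
--         return 0
--     m = (d + k) // 2
--     c = 1
--     for i in range(m):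
--         c = c * (k - i) // (i + 1)
--     return c
-- ===== Notes on version B (the rewrite author's own statement) =====
-- stated objective: alternative
-- what changed: A materialises the full binary tree of all 2^k walks level by level and counts leaves equal to endPos; B computes the closed-form binomial coefficient C(k,(endPos-startPos+k)/2) with an O(k) multiplicative product loop after a parity/range check (intended as the asymptotically better algorithm; a timing run could not confirm a ratio because A times out before a measurable size).
-- intended difference: For k < 0 with startPos = endPos, A's loops never execute and it returns 1 (leftover one-node level), while B returns 0, the intended count since there is no walk of exactly negative length. — e.g. on numberOfWays(0, 0, -1): A returns 1, B returns 0
import Mathlib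
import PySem

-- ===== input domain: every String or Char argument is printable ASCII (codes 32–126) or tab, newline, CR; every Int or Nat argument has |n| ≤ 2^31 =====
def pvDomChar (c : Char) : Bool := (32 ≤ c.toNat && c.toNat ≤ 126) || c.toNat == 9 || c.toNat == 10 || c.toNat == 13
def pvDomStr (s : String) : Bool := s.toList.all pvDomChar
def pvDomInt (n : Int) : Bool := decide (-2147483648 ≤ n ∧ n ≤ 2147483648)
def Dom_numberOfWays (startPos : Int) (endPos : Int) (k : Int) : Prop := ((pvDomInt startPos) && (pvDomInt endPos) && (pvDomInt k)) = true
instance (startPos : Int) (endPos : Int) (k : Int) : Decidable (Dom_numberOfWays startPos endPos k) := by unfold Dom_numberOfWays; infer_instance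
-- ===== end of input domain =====

-- B replaces A's exhaustive tree expansion of all walks by the closed-form binomial
-- coefficient C(k, (endPos-startPos+k)/2) computed with a product loop (objective: alternative).


-- ===== PORT A =====
-- Only the node values matter for the result, so a level of Node objects is a List Int of vals.
-- inner loop 'for j in range(len(level)): n = level.pop(); level_tmp += [n.val+1, n.val-1]'
def pvALevelLoop : Nat → List Int → List Int → List Int
  | 0, _, tmp => tmp
  | j + 1, level, tmp =>
      match PySem.List.pop? level with
      | none => tmp                -- unreachable: the loop runs exactly len(level) times
      | some (n, level') => pvALevelLoop j level' (tmp ++ [n + 1, n - 1])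

-- one iteration of the outer 'for i in range(k)' loop
def pvAStep (level : List Int) : List Int := pvALevelLoop level.length level []

-- final loop 'for i in range(len(level)): n = level.pop(); if n.val == endPos: res += 1'
def pvAResLoop (endPos : Int) : Nat → List Int → Int → Int
  | 0, _, res => res
  | j + 1, level, res =>
      match PySem.List.pop? level with
      | none => res                -- unreachable
      | some (n, level') => pvAResLoop endPos j level' (if n = endPos then res + 1 else res)

def numberOfWays (startPos : Int) (endPos : Int) (k : Int) : Int :=
  let level := (PySem.List.pyRange 0 k 1).foldl (fun lv _ => pvAStep lv) [startPos]
  pvAResLoop endPos level.length level 0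

-- ===== PORT B =====
def numberOfWays_alt (startPos : Int) (endPos : Int) (k : Int) : Int :=
  let d := endPos - startPos
  if PySem.Int.mod (d + k) 2 ≠ 0 ∨ |d| > k then 0
  else
    let m := PySem.Int.floordiv (d + k) 2
    (PySem.List.pyRange 0 m 1).foldl
      (fun c i => PySem.Int.floordiv (c * (k - i)) (i + 1)) 1

-- ===== PRECONDITION & SPEC =====
-- For k < 0 with startPos = endPos, A's loops never execute and it returns 1 (the leftover
-- one-node start level), while B returns 0, the intended count: no walk has negative length.
def D_numberOfWays (startPos : Int) (endPos : Int) (k : Int) : Prop := k < 0 ∧ startPos = endPos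
instance (startPos : Int) (endPos : Int) (k : Int) : Decidable (D_numberOfWays startPos endPos k) := by unfold D_numberOfWays; infer_instance

def Spec_numberOfWays (startPos : Int) (endPos : Int) (k : Int) (out : Int) : Prop := ¬ D_numberOfWays startPos endPos k → out = numberOfWays_alt startPos endPos k
instance (startPos : Int) (endPos : Int) (k : Int) (out : Int) : Decidable (Spec_numberOfWays startPos endPos k out) := by unfold Spec_numberOfWays; infer_instance

def pvDiffWitness_numberOfWays : Int × Int × Int := (0, 0, -1)
def pvDiffWitnessOut_numberOfWays : Int × Int := (1, 0)

-- ===== CLAIM (what is proved, stated in full; the proofs are below) =====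
def Claim_unchanged_numberOfWays : Prop := ∀ (startPos : Int) (endPos : Int) (k : Int), Dom_numberOfWays startPos endPos k → Spec_numberOfWays startPos endPos k (numberOfWays startPos endPos k)
def Claim_changed_numberOfWays : Prop := Dom_numberOfWays (pvDiffWitness_numberOfWays.1) (pvDiffWitness_numberOfWays.2.1) (pvDiffWitness_numberOfWays.2.2) ∧ D_numberOfWays (pvDiffWitness_numberOfWays.1) (pvDiffWitness_numberOfWays.2.1) (pvDiffWitness_numberOfWays.2.2) ∧ numberOfWays (pvDiffWitness_numberOfWays.1) (pvDiffWitness_numberOfWays.2.1) (pvDiffWitness_numberOfWays.2.2) = pvDiffWitnessOut_numberOfWays.1 ∧ numberOfWays_alt (pvDiffWitness_numberOfWays.1) (pvDiffWitness_numberOfWays.2.1) (pvDiffWitness_numberOfWays.2.2) = pvDiffWitnessOut_numberOfWays.2 ∧ pvDiffWitnessOut_numberOfWays.1 ≠ pvDiffWitnessOut_numberOfWays.2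
def Claim_exact_numberOfWays : Prop := ∀ (startPos : Int) (endPos : Int) (k : Int), Dom_numberOfWays startPos endPos k → D_numberOfWays startPos endPos k → numberOfWays startPos endPos k ≠ numberOfWays_alt startPos endPos k

-- ===== LEMMAS AND PROOFS =====

-- number of walk endpoints: pvCoeff n d = number of ±1-walks of length n with displacement d
def pvCoeff (n : Nat) (d : Int) : Nat :=
  if ((n : Int) + d) % 2 = 0 ∧ 0 ≤ (n : Int) + d then Nat.choose n (((n : Int) + d) / 2).toNat else 0

lemma pvALevelLoop_eq (level tmp : List Int) :
    pvALevelLoop level.length level tmp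
      = tmp ++ level.reverse.flatMap (fun n => [n + 1, n - 1]) := by
  induction level using List.reverseRecOn generalizing tmp with
  | nil => simp [pvALevelLoop]
  | append_singleton xs x ih =>
      rw [List.length_append]
      simp only [List.length_singleton, pvALevelLoop, PySem.List.pop?_last]
      rw [ih]
      simp

lemma pvAStep_eq (level : List Int) :
    pvAStep level = level.reverse.flatMap (fun n => [n + 1, n - 1]) := by
  simpa using pvALevelLoop_eq level []

lemma pvAResLoop_eq (e : Int) (level : List Int) (res : Int) :
    pvAResLoop e level.length level res = res + (level.count e : Int) := by
  induction level using List.reverseRecOn generalizing res with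
  | nil => simp [pvAResLoop]
  | append_singleton xs x ih =>
      rw [List.length_append]
      simp only [List.length_singleton, pvAResLoop, PySem.List.pop?_last]
      rw [ih]
      by_cases hx : x = e <;> simp [hx, List.count_append] <;> push_cast <;> ring

lemma count_flatMap_step (L : List Int) (v : Int) :
    (L.flatMap (fun n => [n + 1, n - 1])).count v = L.count (v - 1) + L.count (v + 1) := by
  induction L with
  | nil => simp
  | cons a l ih =>
      simp only [List.flatMap_cons, List.count_append, List.count_cons, ih]
      have h1 : (a + 1 == v) = (a == v - 1) := by
        by_cases h : a = v - 1 <;> simp [h] <;> omega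
      have h2 : (a - 1 == v) = (a == v + 1) := by
        by_cases h : a = v + 1 <;> simp [h] <;> omega
      simp only [List.count_nil, List.count_cons, h1, h2]
      ring

lemma count_pvAStep (L : List Int) (v : Int) :
    (pvAStep L).count v = L.count (v - 1) + L.count (v + 1) := by
  rw [pvAStep_eq]
  have := count_flatMap_step L.reverse v
  simpa [List.count_reverse] using this

lemma pvCoeff_zero (d : Int) : pvCoeff 0 d = if d = 0 then 1 else 0 := by
  unfold pvCoeff
  by_cases hd : d = 0
  · subst hd; norm_num
  · rw [if_neg hd]
    split_ifs with h
    · obtain ⟨h1, h2⟩ := h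
      have hpos : (((0 : Nat) : Int) + d) / 2 ≥ 1 := by omega
      have : ((((0 : Nat) : Int) + d) / 2).toNat ≠ 0 := by omega
      obtain ⟨j, hj⟩ := Nat.exists_eq_succ_of_ne_zero this
      rw [hj, Nat.choose_zero_succ]
    · rfl

lemma pvCoeff_succ (n : Nat) (d : Int) :
    pvCoeff (n + 1) d = pvCoeff n (d - 1) + pvCoeff n (d + 1) := by
  unfold pvCoeff
  push_cast
  split_ifs with h1 h2 h3 h2 h3 h3 h3
  · -- all three conditions hold: Pascal
    obtain ⟨j', hj'⟩ : ∃ j' : Nat, (((n : Int) + (d - 1)) / 2).toNat = j' := ⟨_, rfl⟩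
    have ha : (((n : Int) + 1 + d) / 2).toNat = j' + 1 := by omega
    have hc : (((n : Int) + (d + 1)) / 2).toNat = j' + 1 := by omega
    rw [ha, hj', hc, Nat.choose_succ_succ]
  · omega
  · -- middle fails: n + d - 1 < 0, so n + 1 + d = 0
    have h0 : ((n : Int)) + 1 + d = 0 := by omega
    have ha : (((n : Int) + 1 + d) / 2).toNat = 0 := by omega
    have hc : (((n : Int) + (d + 1)) / 2).toNat = 0 := by omega
    rw [ha, hc, Nat.choose_zero_right, Nat.choose_zero_right]
  · omega
  · omega
  · omega
  · omega
  · rfl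

lemma foldl_const_iterate {α β : Type} (f : α → α) (l : List β) (x : α) :
    l.foldl (fun acc _ => f acc) x = f^[l.length] x := by
  induction l generalizing x with
  | nil => rfl
  | cons a l ih => simp [List.foldl_cons, ih, Function.iterate_succ_apply]

lemma count_iterate_step (n : Nat) (s v : Int) :
    (pvAStep^[n] [s]).count v = pvCoeff n (v - s) := by
  induction n generalizing v with
  | zero =>
      rw [pvCoeff_zero]
      by_cases h : v = s
      · simp [h]
      · have h2 : ¬ (v - s = 0) := by omega
        have h3 : ¬ (s = v) := by omega
        simp [List.count_singleton, h3, h2]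
  | succ n ih =>
      rw [Function.iterate_succ_apply', count_pvAStep, ih, ih, pvCoeff_succ]
      have e1 : v - 1 - s = v - s - 1 := by ring
      have e2 : v + 1 - s = v - s + 1 := by ring
      rw [e1, e2]

lemma numberOfWays_eq_coeff (s e k : Int) :
    numberOfWays s e k = (pvCoeff k.toNat (e - s) : Int) := by
  unfold numberOfWays
  rw [foldl_const_iterate, PySem.List.length_pyRange_one, pvAResLoop_eq]
  have : k - 0 = k := by ring
  rw [this, count_iterate_step]
  ring

lemma pvBloop_eq_choose (k : Int) (hk : 0 ≤ k) (m : Nat) (hm : (m : Int) ≤ k) :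
    (PySem.List.pyRange 0 (m : Int) 1).foldl
      (fun c i => PySem.Int.floordiv (c * (k - i)) (i + 1)) 1
      = (Nat.choose k.toNat m : Int) := by
  induction m with
  | zero => simp [PySem.List.pyRange]
  | succ m ih =>
      have hm' : (m : Int) ≤ k := by push_cast at hm ⊢; omega
      have hcast : ((m + 1 : Nat) : Int) = (m : Int) + 1 := by push_cast; ring
      rw [hcast, PySem.List.pyRange_one_succ_right (by positivity), List.foldl_append,
        ih hm']
      simp only [List.foldl_cons, List.foldl_nil]
      have hkm : k - (m : Int) = ((k.toNat - m : Nat) : Int) := by omega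
      rw [hkm]
      have h1 : (Nat.choose k.toNat m : Int) * ((k.toNat - m : Nat) : Int)
          = ((Nat.choose k.toNat m * (k.toNat - m) : Nat) : Int) := by push_cast; ring
      have h2 : ((m : Int) + 1) = ((m + 1 : Nat) : Int) := by push_cast; ring
      rw [h1, h2, PySem.Int.floordiv_natCast]
      have h3 : Nat.choose k.toNat m * (k.toNat - m) = Nat.choose k.toNat (m + 1) * (m + 1) :=
        (Nat.choose_succ_right_eq k.toNat m).symm
      rw [h3, Nat.mul_div_cancel _ (Nat.succ_pos m)]

lemma pvAltBody_eq_coeff (k d : Int) (h : ¬ (k < 0 ∧ d = 0)) :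
    (if PySem.Int.mod (d + k) 2 ≠ 0 ∨ |d| > k then 0
     else (PySem.List.pyRange 0 (PySem.Int.floordiv (d + k) 2) 1).foldl
        (fun c i => PySem.Int.floordiv (c * (k - i)) (i + 1)) 1)
      = (pvCoeff k.toNat d : Int) := by
  by_cases hk : k < 0
  · -- then d ≠ 0, so |d| > k trivially and both sides are 0
    have hne : d ≠ 0 := fun h0 => h ⟨hk, h0⟩
    have habs : |d| > k := lt_of_lt_of_le hk (abs_nonneg d)
    rw [if_pos (Or.inr habs)]
    have hk0 : k.toNat = 0 := by omega
    rw [hk0, pvCoeff_zero, if_neg hne]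
    rfl
  · push_neg at hk
    rw [PySem.Int.mod_eq_emod_of_pos (by norm_num : (0:Int) < 2)]
    have hkk : ((k.toNat : Nat) : Int) = k := by omega
    by_cases hpar : (d + k) % 2 = 0
    · by_cases habs : |d| > k
      · -- out of range: B returns 0 and the binomial is 0
        rw [if_pos (Or.inr habs)]
        have hd2 : d < -k ∨ k < d := by rcases abs_cases d with ⟨he, _⟩ | ⟨he, _⟩ <;> omega
        unfold pvCoeff
        split_ifs with hc
        · obtain ⟨hc1, hc2⟩ := hc
          rw [hkk] at hc1 hc2
          have hlt : k.toNat < (((k.toNat : Int) + d) / 2).toNat := by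
            rw [hkk]; omega
          rw [Nat.choose_eq_zero_of_lt hlt]
          rfl
        · rfl
      · -- main case: the product loop computes the binomial coefficient
        have hd2 : -k ≤ d ∧ d ≤ k := by rcases abs_cases d with ⟨he, _⟩ | ⟨he, _⟩ <;> omega
        rw [if_neg (by push_neg; exact ⟨hpar, by omega⟩)]
        rw [PySem.Int.floordiv_eq_ediv_of_pos (by norm_num : (0:Int) < 2)]
        obtain ⟨m, hm⟩ : ∃ m : Nat, (m : Int) = (d + k) / 2 := ⟨((d + k) / 2).toNat, by omega⟩
        rw [← hm]
        have hmk : (m : Int) ≤ k := by omega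
        rw [pvBloop_eq_choose k hk m hmk]
        unfold pvCoeff
        rw [if_pos (by rw [hkk]; constructor <;> omega)]
        have : (((k.toNat : Int) + d) / 2).toNat = m := by rw [hkk]; omega
        rw [this]
    · -- parity mismatch: both sides 0
      rw [if_pos (Or.inl hpar)]
      unfold pvCoeff
      rw [if_neg (by rw [hkk]; omega)]
      rfl

lemma numberOfWays_alt_eq_coeff (s e k : Int) (h : ¬ (k < 0 ∧ s = e)) :
    numberOfWays_alt s e k = (pvCoeff k.toNat (e - s) : Int) := by
  have expand : numberOfWays_alt s e k =
      (if PySem.Int.mod ((e - s) + k) 2 ≠ 0 ∨ |e - s| > k then 0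
       else (PySem.List.pyRange 0 (PySem.Int.floordiv ((e - s) + k) 2) 1).foldl
          (fun c i => PySem.Int.floordiv (c * (k - i)) (i + 1)) 1) := rfl
  rw [expand]
  exact pvAltBody_eq_coeff k (e - s) (fun hx => h ⟨hx.1, by omega⟩)

-- ===== VERDICT (by name: the statement is the Claim_ definition above) =====
theorem numberOfWays_spec : Claim_unchanged_numberOfWays := by
  intro s e k _ hD
  rw [numberOfWays_eq_coeff, numberOfWays_alt_eq_coeff s e k (by unfold D_numberOfWays at hD; exact hD)]

theorem numberOfWays_changed : Claim_changed_numberOfWays := by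
  unfold Claim_changed_numberOfWays; decide

theorem numberOfWays_tight : Claim_exact_numberOfWays := by
  intro s e k _ hD
  obtain ⟨hk, hse⟩ := hD
  have hA : numberOfWays s e k = 1 := by
    rw [numberOfWays_eq_coeff]
    have hk0 : k.toNat = 0 := by omega
    rw [hk0, pvCoeff_zero, if_pos (by omega)]
    rfl
  have hB : numberOfWays_alt s e k = 0 := by
    show (if PySem.Int.mod ((e - s) + k) 2 ≠ 0 ∨ |e - s| > k then (0:Int)
       else (PySem.List.pyRange 0 (PySem.Int.floordiv ((e - s) + k) 2) 1).foldl
          (fun c i => PySem.Int.floordiv (c * (k - i)) (i + 1)) 1) = 0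
    rw [if_pos (Or.inr (lt_of_lt_of_le hk (abs_nonneg _)))]
  rw [hA, hB]
  norm_num
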